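-- pv_equiv track=rewrite | github.com/j-c-w/RL_streaming_engine | evaluation/revamp/compute_operations.py | merge_distributions
-- ===== SOURCE A (Python) =====
-- def is_invisible(op):
--     if op == "fptosi" or op == "ret" or op == "phi" or op == "bitcast" or op == "trunc" or op == "Constant" or op == "getelementptr" or op == "extractelement" or op == "insertelement" or op == "load" or op == "store":
--         return True
--     else:
--         return False
--
-- def merge_distributions(distributions):
--     result = {}
--     for distrib in distributions:
--         for op in distrib:
--             if op.startswith('const') or op == 'Constant':
--                 # Skip these as they are 'free'.
--                 continue
--             if is_invisible(op):
--                 # likewise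
--                 continue
--             if op in result:
--                 result[op] += distrib[op]
--             else:
--                 result[op] = distrib[op]
--
--     return result
-- ===== SOURCE B (Python) =====
-- _INVISIBLE = {"fptosi", "ret", "phi", "bitcast", "trunc", "Constant",
--               "getelementptr", "extractelement", "insertelement", "load", "store"}
--
--
-- def _skip(op):
--     return op.startswith('const') or op in _INVISIBLE
--
--
-- def merge_distributions(distributions):
--     # Phase 1: ordered list of the distinct kept keys (first occurrence wins).
--     seen = set()
--     keys = []
--     for distrib in distributions:
--         for op in distrib:
--             if not _skip(op) and op not in seen:
--                 seen.add(op)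
--                 keys.append(op)
--     # Phase 2: recompute each key's total independently by scanning every distribution.
--     return {op: sum(d.get(op, 0) for d in distributions) for op in keys}
-- ===== Notes on version B (the rewrite author's own statement) =====
-- stated objective: alternative
-- what changed: A sums counts into a dict in a single interleaved filter-and-accumulate loop; B first collects the ordered list of distinct kept keys, then recomputes each key's total independently by scanning every distribution with d.get(op, 0) and summing - no running accumulator map at all.
import Mathlib
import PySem

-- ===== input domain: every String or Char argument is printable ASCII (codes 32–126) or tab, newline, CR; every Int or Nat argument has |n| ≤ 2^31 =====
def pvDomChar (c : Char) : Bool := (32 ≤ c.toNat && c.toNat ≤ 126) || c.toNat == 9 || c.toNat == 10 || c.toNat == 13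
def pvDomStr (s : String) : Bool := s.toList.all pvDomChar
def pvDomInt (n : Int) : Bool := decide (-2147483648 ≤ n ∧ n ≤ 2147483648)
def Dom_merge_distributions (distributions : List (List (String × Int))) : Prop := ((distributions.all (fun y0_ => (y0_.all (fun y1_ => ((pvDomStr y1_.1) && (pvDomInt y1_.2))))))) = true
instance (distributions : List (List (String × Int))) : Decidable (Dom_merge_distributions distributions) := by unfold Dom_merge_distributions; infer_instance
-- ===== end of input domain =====

-- B first collects the ordered list of distinct kept keys, then recomputes each key's total
-- independently by scanning every distribution and summing d.get(op, 0) — no running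
-- accumulator map at all (objective: alternative decomposition, inputs not mutated).

-- ===== PORT A =====
def is_invisible (op : String) : Bool :=
  if op == "fptosi" || op == "ret" || op == "phi" || op == "bitcast" || op == "trunc" ||
      op == "Constant" || op == "getelementptr" || op == "extractelement" ||
      op == "insertelement" || op == "load" || op == "store" then
    true
  else
    false

def merge_distributions (distributions : List (List (String × Int))) : List (String × Int) :=
  (distributions.foldl (fun result distrib =>
      distrib.foldl (fun result kv =>
          let op := kv.1
          if PySem.Str.startswith op "const" || op == "Constant" then
            result
          else if is_invisible op then
            result
          else if result.contains op then
            -- distrib[op]: lookup in the distrib dict; op is one of its keys, so the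
            -- KeyError case (none) is unreachable and .getD 0 is exact.
            result.insert op (result.getD op 0 + ((PySem.Dict.mk distrib).get? op).getD 0)
          else
            result.insert op (((PySem.Dict.mk distrib).get? op).getD 0))
        result)
      (PySem.Dict.empty : PySem.Dict String Int)).items

-- ===== PORT B =====
def pvInvisibleSet : PySem.Set String :=
  PySem.Set.ofList ["fptosi", "ret", "phi", "bitcast", "trunc", "Constant",
    "getelementptr", "extractelement", "insertelement", "load", "store"]

def pvSkip (op : String) : Bool :=
  PySem.Str.startswith op "const" || PySem.Set.contains pvInvisibleSet op

def merge_distributions_alt (distributions : List (List (String × Int))) : List (String × Int) :=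
  -- phase 1: (seen, keys) — ordered distinct kept keys, first occurrence wins
  let st := distributions.foldl (fun st distrib =>
      distrib.foldl (fun st kv =>
          if !pvSkip kv.1 && !(PySem.Set.contains st.1 kv.1) then
            (PySem.Set.add st.1 kv.1, st.2 ++ [kv.1])
          else st) st)
    (([] : PySem.Set String), ([] : List String))
  -- phase 2: per-key total recomputed by scanning every distribution (d.get(op, 0))
  st.2.map (fun op =>
    (op, (distributions.map (fun d => ((PySem.Dict.mk d).get? op).getD 0)).sum))

-- ===== PRECONDITION & SPEC =====
-- Pre_ excludes inner association lists with a duplicate key: a Python dict can never contain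
-- one, so such lists correspond to no input A is ever run on, and the first-match assoc-list
-- reading of them is accidental.
def Pre_merge_distributions (distributions : List (List (String × Int))) : Prop :=
  ∀ d ∈ distributions, (d.map Prod.fst).Nodup
instance (distributions : List (List (String × Int))) : Decidable (Pre_merge_distributions distributions) := by unfold Pre_merge_distributions; infer_instance
def pvWitness_merge_distributions : (List (List (String × Int))) :=
  [[("add", 2), ("ret", 1), ("constx", 4)], [("add", 3), ("mul", 5)]]

def Spec_merge_distributions (distributions : List (List (String × Int))) (out : List (String × Int)) : Prop := out = merge_distributions_alt distributions
instance (distributions : List (List (String × Int))) (out : List (String × Int)) : Decidable (Spec_merge_distributions distributions out) := by unfold Spec_merge_distributions; infer_instance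

-- ===== CLAIM (what is proved, stated in full; the proofs are below) =====
def Claim_equal_merge_distributions : Prop := ∀ (distributions : List (List (String × Int))), Dom_merge_distributions distributions → Pre_merge_distributions distributions → Spec_merge_distributions distributions (merge_distributions distributions)

-- ===== LEMMAS AND PROOFS =====

-- the Counter-style per-entry step A's accumulation reduces to
def pvStepFn (t : PySem.Dict String Int) (kv : String × Int) : PySem.Dict String Int :=
  t.modify kv.1 0 (· + kv.2)

-- membership in B's literal set coincides with A's is_invisible chain
lemma pv_contains_inv (op : String) :
    PySem.Set.contains pvInvisibleSet op = is_invisible op := by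
  have h : pvInvisibleSet = ["fptosi", "ret", "phi", "bitcast", "trunc", "Constant",
    "getelementptr", "extractelement", "insertelement", "load", "store"] := by decide
  rw [h]
  simp only [PySem.Set.contains, List.contains_cons, List.contains_nil, is_invisible,
    Bool.or_false, Bool.or_false]
  simp [Bool.or_assoc, Bool.beq_eq_decide_eq]

-- A's three-way branch on one entry equals "skip / Counter-add", given the looked-up value
lemma pv_stepA_eq (r : PySem.Dict String Int) (op : String) (v : Int) :
    (if PySem.Str.startswith op "const" || op == "Constant" then r
     else if is_invisible op then r
     else if r.contains op then r.insert op (r.getD op 0 + v)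
     else r.insert op v)
    = if pvSkip op then r else r.modify op 0 (· + v) := by
  have hskip : pvSkip op = (PySem.Str.startswith op "const" || is_invisible op) := by
    rw [pvSkip, pv_contains_inv]
  rw [hskip]
  by_cases hsw : PySem.Str.startswith op "const" = true
  · simp only [hsw, Bool.true_or, if_pos]
  · rw [Bool.not_eq_true] at hsw
    rw [hsw]
    simp only [Bool.false_or]
    by_cases hC : op = "Constant"
    · subst hC
      simp [is_invisible]
    · have hbC : (op == "Constant") = false := by simp [hC]
      rw [hbC]
      by_cases hinv : is_invisible op = true
      · simp [hinv]
      · rw [Bool.not_eq_true] at hinv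
        simp only [hinv, Bool.false_eq_true, if_false]
        by_cases hc : r.contains op = true
        · rw [if_pos hc]; rfl
        · rw [Bool.not_eq_true] at hc
          simp only [hc, Bool.false_eq_true, if_false]
          show r.insert op v = r.insert op (r.getD op 0 + v)
          rw [PySem.Dict.getD_of_not_contains r 0 hc, zero_add]

-- value of the Counter-style fold at one key
lemma pv_getD_foldl (l : List (String × Int)) (d : PySem.Dict String Int) (k : String) :
    (l.foldl pvStepFn d).getD k 0
      = d.getD k 0 + ((l.filter (fun kv => kv.1 == k)).map Prod.snd).sum := by
  induction l generalizing d with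
  | nil => simp
  | cons kv tl ih =>
    rw [List.foldl_cons, ih]
    by_cases h : kv.1 = k
    · simp [pvStepFn, h]
      ring
    · simp [pvStepFn, PySem.Dict.getD_modify, h, Ne.symm h]

lemma pv_keys_fold (E : List (String × Int)) :
    (E.foldl pvStepFn PySem.Dict.empty).keys = PySem.Set.ofList (E.map Prod.fst) := by
  have h := PySem.Dict.keys_foldl_modify_key E Prod.fst (0 : Int)
    (fun _ kv => (· + kv.2)) PySem.Dict.empty
  rw [show (fun (d : PySem.Dict String Int) (x : String × Int) =>
        d.modify x.1 0 ((fun _ kv => (· + kv.2)) d x)) = pvStepFn from rfl] at h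
  rw [h, PySem.Set.ofList_eq_foldl]
  rfl

lemma pv_nodup_fold (E : List (String × Int)) :
    (E.foldl pvStepFn PySem.Dict.empty).keys.Nodup := by
  have h := PySem.Dict.nodup_keys_foldl_modify_key E Prod.fst (0 : Int)
    (fun _ kv => (· + kv.2)) PySem.Dict.empty (by simp)
  rwa [show (fun (d : PySem.Dict String Int) (x : String × Int) =>
        d.modify x.1 0 ((fun _ kv => (· + kv.2)) d x)) = pvStepFn from rfl] at h

-- B's (seen, keys) pair stays diagonal: both components are the same distinct-key list
lemma pv_diag (E : List (String × Int)) (l : List String) :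
    E.foldl (fun st (kv : String × Int) =>
        if !pvSkip kv.1 && !(PySem.Set.contains st.1 kv.1) then
          (PySem.Set.add st.1 kv.1, st.2 ++ [kv.1])
        else st) (l, l)
    = (E.foldl (fun s kv => if !pvSkip kv.1 then PySem.Set.add s kv.1 else s) l,
       E.foldl (fun s kv => if !pvSkip kv.1 then PySem.Set.add s kv.1 else s) l) := by
  induction E generalizing l with
  | nil => rfl
  | cons kv tl ih =>
    rw [List.foldl_cons, List.foldl_cons]
    by_cases hp : pvSkip kv.1 = true
    · simp only [hp, Bool.not_true, Bool.false_and, Bool.false_eq_true, if_false, ih]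
    · rw [Bool.not_eq_true] at hp
      simp only [hp, Bool.not_false, Bool.true_and, if_true]
      by_cases hc : PySem.Set.contains l kv.1 = true
      · have hm : kv.1 ∈ l := by simpa [PySem.Set.contains] using hc
        simp only [hc, Bool.not_true, Bool.false_eq_true, if_false,
          PySem.Set.add_of_mem hm, ih]
      · have hm : kv.1 ∉ l := by simpa [PySem.Set.contains] using hc
        simp only [hc, Bool.not_false, if_true, PySem.Set.add_of_not_mem hm, ih]

-- single dict lookup as a filter-sum over the association list (needs Nodup keys)
lemma pv_get_eq_sum (d : List (String × Int)) (k : String) (hnd : (d.map Prod.fst).Nodup) :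
    ((PySem.Dict.mk d).get? k).getD 0
      = ((d.filter (fun kv => kv.1 == k)).map Prod.snd).sum := by
  induction d with
  | nil => simp [PySem.Dict.get?]
  | cons kv tl ih =>
    rw [List.map_cons, List.nodup_cons] at hnd
    rw [PySem.Dict.get?_mk_cons, List.filter_cons]
    by_cases h : kv.1 = k
    · have hnone : tl.filter (fun kv' => kv'.1 == k) = [] := by
        apply List.filter_eq_nil_iff.mpr
        intro kv' hkv'
        simp only [beq_iff_eq]
        intro hk
        exact hnd.1 (h ▸ hk ▸ List.mem_map_of_mem hkv')
      simp [h, hnone]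
    · have hb : (kv.1 == k) = false := by simp [h]
      rw [hb]
      simp only [Bool.false_eq_true, if_false]
      exact ih hnd.2

-- sum of per-distribution lookups = filter-sum over the flattened entry list
lemma pv_sum_get (ds : List (List (String × Int))) (k : String)
    (hpre : ∀ d ∈ ds, (d.map Prod.fst).Nodup) :
    (ds.map (fun d => ((PySem.Dict.mk d).get? k).getD 0)).sum
      = ((ds.flatten.filter (fun kv => kv.1 == k)).map Prod.snd).sum := by
  induction ds with
  | nil => simp
  | cons d tl ih =>
    rw [List.map_cons, List.sum_cons, List.flatten_cons, List.filter_append, List.map_append,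
      List.sum_append, pv_get_eq_sum d k (hpre d (by simp)),
      ih (fun d' hd' => hpre d' (List.mem_cons_of_mem _ hd'))]

-- ===== VERDICT (by name: the statement is the Claim_ definition above) =====
theorem merge_distributions_spec : Claim_equal_merge_distributions := by
  intro ds _ hpre
  unfold Spec_merge_distributions
  rw [merge_distributions, merge_distributions_alt]
  -- A's accumulation = Counter fold over the kept entries of the flattened list
  have hA : ds.foldl (fun result distrib =>
      distrib.foldl (fun result kv =>
          let op := kv.1
          if PySem.Str.startswith op "const" || op == "Constant" then
            result
          else if is_invisible op then
            result
          else if result.contains op then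
            result.insert op (result.getD op 0 + ((PySem.Dict.mk distrib).get? op).getD 0)
          else
            result.insert op (((PySem.Dict.mk distrib).get? op).getD 0))
        result)
      (PySem.Dict.empty : PySem.Dict String Int)
    = (ds.flatten.filter (fun kv => !pvSkip kv.1)).foldl pvStepFn PySem.Dict.empty := by
    have h1 : ds.foldl (fun result distrib =>
        distrib.foldl (fun result kv =>
            let op := kv.1
            if PySem.Str.startswith op "const" || op == "Constant" then
              result
            else if is_invisible op then
              result
            else if result.contains op then
              result.insert op (result.getD op 0 + ((PySem.Dict.mk distrib).get? op).getD 0)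
            else
              result.insert op (((PySem.Dict.mk distrib).get? op).getD 0))
          result)
        (PySem.Dict.empty : PySem.Dict String Int)
      = ds.foldl (fun result distrib =>
          distrib.foldl (fun r kv => if !pvSkip kv.1 then pvStepFn r kv else r) result)
        (PySem.Dict.empty : PySem.Dict String Int) := by
      apply PySem.List.foldl_congr_mem
      intro acc d hd
      apply PySem.List.foldl_congr_mem
      intro r kv hkv
      have hlook : ((PySem.Dict.mk d).get? kv.1).getD 0 = kv.2 := by
        have hnd : (PySem.Dict.mk d).keys.Nodup := by
          simpa using hpre d hd
        have hmem : (kv.1, kv.2) ∈ (PySem.Dict.mk d).items := by simpa using hkv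
        rw [PySem.Dict.get?_of_mem_items _ hmem hnd]
        rfl
      show (let op := kv.1 ; _) = _
      simp only [hlook]
      rw [pv_stepA_eq r kv.1 kv.2]
      cases h : pvSkip kv.1 <;> simp [pvStepFn]
    rw [h1, show (fun (r : PySem.Dict String Int) (d : List (String × Int)) =>
        d.foldl (fun r kv => if !pvSkip kv.1 then pvStepFn r kv else r) r)
      = (fun r d => d.foldl (fun r kv => if !pvSkip kv.1 then pvStepFn r kv else r) r) from rfl,
      ← List.foldl_flatten,
      PySem.List.foldl_if_eq_foldl_filter (fun kv : String × Int => !pvSkip kv.1) pvStepFn]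
  rw [hA]
  set E := ds.flatten.filter (fun kv => !pvSkip kv.1) with hE
  set dA := E.foldl pvStepFn PySem.Dict.empty with hdA
  -- B's first phase produces exactly dA's key list
  have hB1 : (ds.foldl (fun st distrib =>
      distrib.foldl (fun st (kv : String × Int) =>
          if !pvSkip kv.1 && !(PySem.Set.contains st.1 kv.1) then
            (PySem.Set.add st.1 kv.1, st.2 ++ [kv.1])
          else st) st)
    (([] : PySem.Set String), ([] : List String))).2 = dA.keys := by
    rw [show (fun (st : PySem.Set String × List String) (distrib : List (String × Int)) =>
        distrib.foldl (fun st kv =>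
          if !pvSkip kv.1 && !(PySem.Set.contains st.1 kv.1) then
            (PySem.Set.add st.1 kv.1, st.2 ++ [kv.1])
          else st) st)
      = (fun st d => d.foldl (fun st (kv : String × Int) =>
          if !pvSkip kv.1 && !(PySem.Set.contains st.1 kv.1) then
            (PySem.Set.add st.1 kv.1, st.2 ++ [kv.1])
          else st) st) from rfl, ← List.foldl_flatten, pv_diag]
    rw [PySem.List.foldl_if_eq_foldl_filter (fun kv : String × Int => !pvSkip kv.1)
      (fun s kv => PySem.Set.add s kv.1)]
    rw [hdA, pv_keys_fold, hE]
    rw [show (fun (s : PySem.Set String) (kv : String × Int) => PySem.Set.add s kv.1)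
      = (fun s kv => PySem.Set.add s ((Prod.fst : String × Int → String) kv)) from rfl,
      ← PySem.Set.update_map_eq_foldl_add, PySem.Set.update_nil_left]
  rw [hB1]
  -- both sides now map over dA.keys; compare the values at each key
  rw [PySem.Dict.items_eq_map_keys dA (by rw [hdA]; exact pv_nodup_fold E) 0]
  apply List.map_congr_left
  intro k hk
  have hpk : pvSkip k = false := by
    rw [hdA, pv_keys_fold] at hk
    have hk' := (PySem.Set.mem_ofList _ _).mp hk
    obtain ⟨kv, hkv, hfst⟩ := List.mem_map.mp hk'
    have := List.of_mem_filter (hE ▸ hkv)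
    simpa [hfst] using this
  have hval : dA.getD k 0 = ((ds.flatten.filter (fun kv => kv.1 == k)).map Prod.snd).sum := by
    rw [hdA, pv_getD_foldl, PySem.Dict.getD_empty, zero_add, hE, List.filter_filter]
    congr 1
    congr 1
    apply List.filter_congr
    intro kv _
    by_cases h : kv.1 = k
    · simp [h, hpk]
    · simp [h]
  rw [hval, pv_sum_get ds k hpre]
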